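-- pv_equiv track=rewrite | github.com/pypi-data/pypi-mirror-298 | packages/ortools-puzzles-solvers/ortools-puzzles-solvers-1.0.0.tar.gz/ortools-puzzles-solvers-1.0.0/solvers/common/neighbourhood.py | get_eight_neighbourhood
-- ===== SOURCE A (Python) =====
-- def get_eight_neighbourhood(row, column, width, height):
--     is_valid_neighbour = (
--         lambda row, col: row >= 0 and row < height and col >= 0 and col < width
--     )
--     neighbours = [
--         (row - 1, column - 1),
--         (row - 1, column),
--         (row - 1, column + 1),
--         (row, column - 1),
--         (row, column + 1),
--         (row + 1, column - 1),
--         (row + 1, column),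
--         (row + 1, column + 1),
--     ]
--     return [n for n in neighbours if is_valid_neighbour(n[0], n[1])]
-- ===== SOURCE B (Python) =====
-- def get_eight_neighbourhood(row, column, width, height):
--     result = []
--     for r in range(max(0, row - 1), min(height, row + 2)):
--         for c in range(max(0, column - 1), min(width, column + 2)):
--             if (r, c) != (row, column):
--                 result.append((r, c))
--     return result
-- ===== Notes on version B (the rewrite author's own statement) =====
-- stated objective: simpler
-- what changed: Instead of listing all 8 candidate cells and filtering each through a bounds predicate, B iterates over the clamped row range max(0,row-1)..min(height,row+2) and column range max(0,column-1)..min(width,column+2), skipping the centre cell; same row-major order, no per-cell bounds test.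
import Mathlib
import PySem

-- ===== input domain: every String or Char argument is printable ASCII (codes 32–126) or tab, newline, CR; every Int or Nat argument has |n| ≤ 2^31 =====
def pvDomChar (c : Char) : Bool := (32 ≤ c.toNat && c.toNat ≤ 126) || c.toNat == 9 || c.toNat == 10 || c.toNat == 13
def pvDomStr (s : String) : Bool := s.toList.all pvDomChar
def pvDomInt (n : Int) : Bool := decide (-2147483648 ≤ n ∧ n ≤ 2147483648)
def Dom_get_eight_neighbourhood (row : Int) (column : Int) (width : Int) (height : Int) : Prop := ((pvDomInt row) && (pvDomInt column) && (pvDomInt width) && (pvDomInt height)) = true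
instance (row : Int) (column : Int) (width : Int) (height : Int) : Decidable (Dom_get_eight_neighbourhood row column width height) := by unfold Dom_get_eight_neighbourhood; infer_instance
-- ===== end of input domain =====

-- B iterates the clamped row/column ranges and skips the centre cell instead of
-- filtering all 8 candidates through a bounds predicate (objective: simpler).

-- ===== PORT A =====
def get_eight_neighbourhood (row : Int) (column : Int) (width : Int) (height : Int) : List (Int × Int) :=
  let is_valid_neighbour : Int → Int → Bool :=
    fun r c => decide (0 ≤ r) && decide (r < height) && decide (0 ≤ c) && decide (c < width)
  let neighbours : List (Int × Int) :=
    [(row - 1, column - 1), (row - 1, column), (row - 1, column + 1),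
     (row, column - 1), (row, column + 1),
     (row + 1, column - 1), (row + 1, column), (row + 1, column + 1)]
  neighbours.filter (fun n => is_valid_neighbour n.1 n.2)

-- ===== PORT B =====
def get_eight_neighbourhood_alt (row : Int) (column : Int) (width : Int) (height : Int) : List (Int × Int) :=
  (PySem.List.pyRange (max 0 (row - 1)) (min height (row + 2)) 1).foldl
    (fun result r =>
      (PySem.List.pyRange (max 0 (column - 1)) (min width (column + 2)) 1).foldl
        (fun result c => if (r, c) ≠ (row, column) then result ++ [(r, c)] else result)
        result)
    []

-- ===== PRECONDITION & SPEC =====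
def Spec_get_eight_neighbourhood (row : Int) (column : Int) (width : Int) (height : Int) (out : List (Int × Int)) : Prop := out = get_eight_neighbourhood_alt row column width height
instance (row : Int) (column : Int) (width : Int) (height : Int) (out : List (Int × Int)) : Decidable (Spec_get_eight_neighbourhood row column width height out) := by unfold Spec_get_eight_neighbourhood; infer_instance

-- ===== CLAIM (what is proved, stated in full; the proofs are below) =====
def Claim_equal_get_eight_neighbourhood : Prop := ∀ (row : Int) (column : Int) (width : Int) (height : Int), Dom_get_eight_neighbourhood row column width height → Spec_get_eight_neighbourhood row column width height (get_eight_neighbourhood row column width height)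

-- ===== LEMMAS AND PROOFS =====

lemma pyRange_len2 (a : Int) : PySem.List.pyRange a (a + 2) 1 = [a, a + 1] := by
  rw [PySem.List.pyRange_one_cons (by omega), PySem.List.pyRange_one_cons (by omega),
      PySem.List.pyRange_one_eq_nil (by omega)]

lemma pyRange_len3 (a : Int) : PySem.List.pyRange a (a + 3) 1 = [a, a + 1, a + 1 + 1] := by
  rw [PySem.List.pyRange_one_cons (by omega), PySem.List.pyRange_one_cons (by omega),
      PySem.List.pyRange_one_cons (by omega), PySem.List.pyRange_one_eq_nil (by omega)]

-- the clamped range equals the bounds-filtered candidate triple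
lemma clampRange (x h : Int) :
    PySem.List.pyRange (max 0 (x - 1)) (min h (x + 2)) 1
      = [x - 1, x, x + 1].filter (fun r => decide (0 ≤ r) && decide (r < h)) := by
  by_cases hx1 : 1 ≤ x
  · -- max = x - 1
    have hm : max 0 (x - 1) = x - 1 := by omega
    by_cases hh : x + 2 ≤ h
    · have hn : min h (x + 2) = x + 2 := by omega
      rw [hm, hn, show x + 2 = (x - 1) + 3 by ring, pyRange_len3]
      simp only [List.filter_cons, List.filter_nil]
      have c1 : (0:Int) ≤ x - 1 := by omega
      have c2 : x - 1 < h := by omega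
      have c3 : (0:Int) ≤ x := by omega
      have c4 : x < h := by omega
      have c5 : (0:Int) ≤ x + 1 := by omega
      have c6 : x + 1 < h := by omega
      simp [c2, c3, c4, c5, c6]; omega
    · by_cases hh2 : x + 1 ≤ h
      · have hn : min h (x + 2) = (x - 1) + 2 := by omega
        have hh' : h = x + 1 := by omega
        rw [hm, hn, pyRange_len2]
        have c1 : (0:Int) ≤ x - 1 := by omega
        have c2 : x - 1 < h := by omega
        have c3 : (0:Int) ≤ x := by omega
        have c4 : x < h := by omega
        have c6 : ¬ (x + 1 < h) := by omega
        simp [List.filter_cons, List.filter_nil, c2, c3, c4, c6]; omega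
      · by_cases hh3 : x ≤ h
        · have hh' : h = x := by omega
          have hn : min h (x + 2) = (x - 1) + 1 := by omega
          rw [hm, hn, PySem.List.pyRange_one_singleton]
          have c1 : (0:Int) ≤ x - 1 := by omega
          have c2 : x - 1 < h := by omega
          have c4 : ¬ (x < h) := by omega
          have c6 : ¬ (x + 1 < h) := by omega
          simp [List.filter_cons, List.filter_nil, c2, c4, c6]; omega
        · have hn : PySem.List.pyRange (max 0 (x - 1)) (min h (x + 2)) 1 = [] :=
            PySem.List.pyRange_one_eq_nil (by omega)
          rw [hn]
          have c2 : ¬ (x - 1 < h) := by omega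
          have c4 : ¬ (x < h) := by omega
          have c6 : ¬ (x + 1 < h) := by omega
          simp [List.filter_nil, c2, c4, c6]
  · by_cases hx2 : 0 ≤ x
    · -- x = 0, max = 0 = x
      have hx0 : x = 0 := by omega
      subst hx0
      have hm : max (0:Int) (0 - 1) = 0 := by omega
      rw [hm]
      by_cases hh : 2 ≤ h
      · have hn : min h (0 + 2) = 0 + 2 := by omega
        rw [hn, show (0:Int) + 2 = 0 + 2 by ring, pyRange_len2]
        have c4 : (0:Int) < h := by omega
        have c6 : (0:Int) + 1 < h := by omega
        simp [List.filter_cons, List.filter_nil, c4]; omega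
      · by_cases hh2 : 1 ≤ h
        · have hn : min h (0 + 2) = 0 + 1 := by omega
          rw [hn, PySem.List.pyRange_one_singleton]
          have c4 : (0:Int) < h := by omega
          have c6 : ¬ ((0:Int) + 1 < h) := by omega
          simp [List.filter_cons, List.filter_nil, c4]; omega
        · have hn : PySem.List.pyRange 0 (min h (0 + 2)) 1 = [] :=
            PySem.List.pyRange_one_eq_nil (by omega)
          rw [hn]
          have c4 : ¬ ((0:Int) < h) := by omega
          have c6 : ¬ ((0:Int) + 1 < h) := by omega
          simp [List.filter_cons, List.filter_nil, c4]; omega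
    · by_cases hx3 : 0 ≤ x + 1
      · -- x = -1, max = 0 = x + 1
        have hx0 : x = -1 := by omega
        subst hx0
        have hm : max (0:Int) (-1 - 1) = 0 := by omega
        rw [hm]
        by_cases hh : 1 ≤ h
        · have hn : min h (-1 + 2) = 0 + 1 := by omega
          rw [hn, PySem.List.pyRange_one_singleton]
          have c6 : (-1:Int) + 1 < h := by omega
          simp [List.filter_cons, List.filter_nil]; omega
        · have hn : PySem.List.pyRange 0 (min h (-1 + 2)) 1 = [] :=
            PySem.List.pyRange_one_eq_nil (by omega)
          rw [hn]
          have c6 : ¬ ((-1:Int) + 1 < h) := by omega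
          simp [List.filter_cons, List.filter_nil]; omega
      · -- x ≤ -2 : everything out of range on the left
        have hn : PySem.List.pyRange (max 0 (x - 1)) (min h (x + 2)) 1 = [] :=
          PySem.List.pyRange_one_eq_nil (by omega)
        rw [hn]
        have c1 : ¬ ((0:Int) ≤ x - 1) := by omega
        have c3 : ¬ ((0:Int) ≤ x) := by omega
        have c5 : ¬ ((0:Int) ≤ x + 1) := by omega
        simp [List.filter_cons, List.filter_nil, c3, c5]; omega

lemma seg_if (hgt wdt r : Int) (cols : List Int) :
    List.map (Prod.mk r)
        (List.filter (fun c => decide (0 ≤ r) && decide (r < hgt) && decide (0 ≤ c) && decide (c < wdt)) cols)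
      = if (decide (0 ≤ r) && decide (r < hgt)) = true
        then List.map (Prod.mk r) (List.filter (fun c => decide (0 ≤ c) && decide (c < wdt)) cols)
        else [] := by
  cases hb : (decide (0 ≤ r) && decide (r < hgt)) with
  | false =>
    rw [if_neg (by simp)]
    simp only [← Bool.and_assoc, Bool.false_and, List.filter_false, List.map_nil]
  | true =>
    rw [if_pos rfl]
    simp only [← Bool.and_assoc, Bool.true_and]

lemma flatMap_filter_eq {α β : Type} (p : α → Bool) (g : α → List β) (l : List α) :
    (l.filter p).flatMap g = l.flatMap (fun x => if p x then g x else []) := by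
  induction l with
  | nil => simp
  | cons a l ih =>
    by_cases h : p a <;> simp [h, ih]

-- ===== VERDICT (by name: the statement is the Claim_ definition above) =====
theorem get_eight_neighbourhood_spec : Claim_equal_get_eight_neighbourhood := by
  intro row column width height _
  unfold Spec_get_eight_neighbourhood get_eight_neighbourhood get_eight_neighbourhood_alt
  simp only [PySem.List.foldl_append_ite]
  rw [PySem.List.foldl_append_eq_flatMap, List.nil_append]
  rw [clampRange row height, clampRange column width]
  rw [flatMap_filter_eq]
  have hA : [(row - 1, column - 1), (row - 1, column), (row - 1, column + 1),
      (row, column - 1), (row, column + 1),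
      (row + 1, column - 1), (row + 1, column), (row + 1, column + 1)]
      = ([column - 1, column, column + 1].map (Prod.mk (row - 1)))
        ++ ([column - 1, column + 1].map (Prod.mk row))
        ++ ([column - 1, column, column + 1].map (Prod.mk (row + 1))) := rfl
  rw [hA, List.filter_append, List.filter_append, List.filter_map, List.filter_map,
      List.filter_map]
  simp only [List.flatMap_cons, List.flatMap_nil, List.append_nil]
  have e1 : List.filter (fun c => decide (((row - 1 : Int), c) ≠ (row, column)))
        (List.filter (fun r => decide (0 ≤ r) && decide (r < width)) [column - 1, column, column + 1])
      = List.filter (fun r => decide (0 ≤ r) && decide (r < width)) [column - 1, column, column + 1] :=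
    List.filter_eq_self.mpr (by intro a _; simp)
  have e3 : List.filter (fun c => decide (((row + 1 : Int), c) ≠ (row, column)))
        (List.filter (fun r => decide (0 ≤ r) && decide (r < width)) [column - 1, column, column + 1])
      = List.filter (fun r => decide (0 ≤ r) && decide (r < width)) [column - 1, column, column + 1] :=
    List.filter_eq_self.mpr (by intro a _; simp)
  have e2 : List.filter (fun c => decide (((row : Int), c) ≠ (row, column)))
        (List.filter (fun r => decide (0 ≤ r) && decide (r < width)) [column - 1, column, column + 1])
      = List.filter (fun r => decide (0 ≤ r) && decide (r < width)) [column - 1, column + 1] := by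
    rw [List.filter_comm]
    have : List.filter (fun c => decide (((row : Int), c) ≠ (row, column))) [column - 1, column, column + 1]
        = [column - 1, column + 1] := by
      simp [List.filter_nil]
    rw [this]
  rw [e1, e2, e3]
  simp only [Function.comp_def]
  rw [seg_if height width (row - 1), seg_if height width row, seg_if height width (row + 1),
      List.append_assoc]
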